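-- pv_equiv track=rewrite | github.com/tusharshinde05/Equip9 | question2.py | match_requests
-- ===== SOURCE A (Python) =====
-- import heapq
--
-- def match_requests(requests, sellers):
--     equipment_map = {}
--
--     for equip, price in sellers:
--         if equip not in equipment_map:
--             equipment_map[equip] = []
--         heapq.heappush(equipment_map[equip], price)
--
--     result = []
--
--     for equip, max_price in requests:
--         if equip in equipment_map:
--             while equipment_map[equip] and equipment_map[equip][0] > max_price:
--                 heapq.heappop(equipment_map[equip])
--             if equipment_map[equip]:
--                 result.append(heapq.heappop(equipment_map[equip]))
--             else:
--                 result.append(None)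
--         else:
--             result.append(None)
--
--     return result
--
-- requests = [("excavator", 50000), ("bulldozer", 70000)]
--
-- sellers = [("excavator", 45000), ("bulldozer", 68000), ("excavator", 48000)]
-- ===== SOURCE B (Python) =====
-- def match_requests(requests, sellers):
--     groups = {}
--     for equip, price in sellers:
--         groups.setdefault(equip, []).append(price)
--     for equip in groups:
--         groups[equip] = sorted(groups[equip])
--     result = []
--     for equip, max_price in requests:
--         lst = groups.get(equip)
--         if lst is None:
--             result.append(None)
--         elif lst and lst[0] <= max_price:
--             result.append(lst.pop(0))
--         else:
--             lst.clear()
--             result.append(None)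
--     return result
-- ===== Notes on version B (the rewrite author's own statement) =====
-- stated objective: simpler
-- what changed: Replaces the per-seller min-heap pushes and the per-request while-loop of heap-pops with one setdefault grouping pass plus a single sort per equipment, so each request is answered by one look at the head of a sorted list (take it, or clear the whole list when it exceeds the cap).
import Mathlib
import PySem

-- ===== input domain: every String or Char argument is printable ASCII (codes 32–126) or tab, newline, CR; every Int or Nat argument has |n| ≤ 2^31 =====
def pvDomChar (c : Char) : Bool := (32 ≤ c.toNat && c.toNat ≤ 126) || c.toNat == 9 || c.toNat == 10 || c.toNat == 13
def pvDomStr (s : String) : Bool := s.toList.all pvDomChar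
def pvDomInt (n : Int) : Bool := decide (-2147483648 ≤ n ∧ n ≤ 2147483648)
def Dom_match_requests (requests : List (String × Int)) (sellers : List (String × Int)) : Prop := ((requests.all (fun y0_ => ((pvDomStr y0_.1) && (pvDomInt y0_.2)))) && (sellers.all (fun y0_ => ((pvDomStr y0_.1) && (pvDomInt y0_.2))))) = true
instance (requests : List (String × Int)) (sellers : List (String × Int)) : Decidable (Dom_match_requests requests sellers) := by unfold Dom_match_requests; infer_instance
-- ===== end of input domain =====

-- B replaces A's min-heaps and per-request heap-pop while-loop with one grouping pass plus a
-- single sort per equipment, answering each request by looking at the head of a sorted list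
-- (objective: simpler). Both mutate only internal state; the equivalence is about the return value.

-- ===== PORT A =====
-- heapq heaps of ints are modeled by their sorted sequence: heappush = ordered insert,
-- heap[0] = head = minimum, heappop = remove head. Exact for every observable value, since
-- a Python int heap exposes only its minimum and its multiset of elements.
def pvAInsert (d : PySem.Dict String (List Int)) (p : String × Int) : PySem.Dict String (List Int) :=
  -- if equip not in equipment_map: equipment_map[equip] = []
  let d := if d.contains p.1 then d else d.insert p.1 ([] : List Int)
  -- heapq.heappush(equipment_map[equip], price)
  d.insert p.1 (List.orderedInsert (· ≤ ·) p.2 (d.getD p.1 []))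

-- while equipment_map[equip] and equipment_map[equip][0] > max_price: heapq.heappop(...)
def pvHeapDrop (cap : Int) : List Int → List Int
  | [] => []
  | x :: t => if cap < x then pvHeapDrop cap t else x :: t

def pvAStep (st : PySem.Dict String (List Int) × List (Option Int)) (p : String × Int) :
    PySem.Dict String (List Int) × List (Option Int) :=
  if st.1.contains p.1 then
    match pvHeapDrop p.2 (st.1.getD p.1 []) with
    | [] => (st.1.insert p.1 [], st.2 ++ [none])                 -- heap exhausted → None
    | x :: t => (st.1.insert p.1 t, st.2 ++ [some x])            -- heappop → cheapest
  else (st.1, st.2 ++ [none])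

def match_requests (requests : List (String × Int)) (sellers : List (String × Int)) : List (Option Int) :=
  let equipment_map := sellers.foldl pvAInsert PySem.Dict.empty
  (requests.foldl pvAStep (equipment_map, ([] : List (Option Int)))).2

-- ===== PORT B =====
-- groups.setdefault(equip, []).append(price)
def pvBGroup (d : PySem.Dict String (List Int)) (p : String × Int) : PySem.Dict String (List Int) :=
  d.modify p.1 [] (· ++ [p.2])

-- groups[equip] = sorted(groups[equip])
def pvBSortAt (d : PySem.Dict String (List Int)) (k : String) : PySem.Dict String (List Int) :=
  d.insert k (PySem.List.sorted (d.getD k []) (fun x => x) false)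

def pvBStep (st : PySem.Dict String (List Int) × List (Option Int)) (p : String × Int) :
    PySem.Dict String (List Int) × List (Option Int) :=
  match st.1.get? p.1 with
  | none => (st.1, st.2 ++ [none])                               -- equipment never seen
  | some [] => (st.1.insert p.1 [], st.2 ++ [none])              -- lst.clear(); None
  | some (x :: t) =>
    if x ≤ p.2 then (st.1.insert p.1 t, st.2 ++ [some x])        -- lst.pop(0)
    else (st.1.insert p.1 [], st.2 ++ [none])                    -- lst.clear(); None

def match_requests_alt (requests : List (String × Int)) (sellers : List (String × Int)) : List (Option Int) :=
  let groups := sellers.foldl pvBGroup PySem.Dict.empty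
  let groups := groups.keys.foldl pvBSortAt groups
  (requests.foldl pvBStep (groups, ([] : List (Option Int)))).2

-- ===== PRECONDITION & SPEC =====
def Spec_match_requests (requests : List (String × Int)) (sellers : List (String × Int)) (out : List (Option Int)) : Prop := out = match_requests_alt requests sellers
instance (requests : List (String × Int)) (sellers : List (String × Int)) (out : List (Option Int)) : Decidable (Spec_match_requests requests sellers out) := by unfold Spec_match_requests; infer_instance

-- ===== CLAIM (what is proved, stated in full; the proofs are below) =====
def Claim_equal_match_requests : Prop := ∀ (requests : List (String × Int)) (sellers : List (String × Int)), Dom_match_requests requests sellers → Spec_match_requests requests sellers (match_requests requests sellers)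

-- ===== LEMMAS AND PROOFS =====

-- all heap values in the dict are sorted ascending
def pvInv (d : PySem.Dict String (List Int)) : Prop :=
  ∀ k l, d.get? k = some l → l.Pairwise (· ≤ ·)

lemma pvAInsert_eq (d : PySem.Dict String (List Int)) (p : String × Int) :
    pvAInsert d p = d.insert p.1 (List.orderedInsert (· ≤ ·) p.2 (d.getD p.1 [])) := by
  unfold pvAInsert
  by_cases hc : d.contains p.1
  · simp [hc]
  · simp only [hc, Bool.false_eq_true, if_false]
    rw [PySem.Dict.getD_insert_self, PySem.Dict.insert_insert_self,
        PySem.Dict.getD_of_not_contains d [] (by simp [hc])]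

lemma pvHeapDrop_nil (cap : Int) (l : List Int) (h : ∀ y ∈ l, cap < y) : pvHeapDrop cap l = [] := by
  induction l with
  | nil => rfl
  | cons x t ih =>
    simp only [pvHeapDrop, if_pos (h x (by simp))]
    exact ih fun y hy => h y (by simp [hy])

lemma pvHeapDrop_of_sorted (cap : Int) (l : List Int) (h : l.Pairwise (· ≤ ·)) :
    pvHeapDrop cap l = match l with
      | [] => []
      | x :: t => if cap < x then [] else x :: t := by
  cases l with
  | nil => rfl
  | cons x t =>
    by_cases hx : cap < x
    · simp only [pvHeapDrop, if_pos hx]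
      exact pvHeapDrop_nil cap t fun y hy => lt_of_lt_of_le hx ((List.pairwise_cons.1 h).1 y hy)
    · simp [pvHeapDrop, hx]

lemma pvInv_pvAInsert (d : PySem.Dict String (List Int)) (p : String × Int) (h : pvInv d) :
    pvInv (pvAInsert d p) := by
  rw [pvAInsert_eq]
  intro k l hl
  rw [PySem.Dict.get?_insert] at hl
  split_ifs at hl with hk
  · cases hl
    apply List.Pairwise.orderedInsert
    cases hg : d.get? p.1 with
    | none => simp [PySem.Dict.getD_eq_get?_getD, hg]
    | some l0 => rw [PySem.Dict.getD_of_get?_eq_some _ _ hg]; exact h _ _ hg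
  · exact h _ _ hl

lemma pvInv_build (l : List (String × Int)) (d : PySem.Dict String (List Int)) (h : pvInv d) :
    pvInv (l.foldl pvAInsert d) := by
  induction l generalizing d with
  | nil => exact h
  | cons p t ih => exact ih _ (pvInv_pvAInsert d p h)

lemma pvStep_eq (d : PySem.Dict String (List Int)) (res : List (Option Int)) (p : String × Int)
    (h : pvInv d) : pvAStep (d, res) p = pvBStep (d, res) p := by
  unfold pvAStep pvBStep
  cases hg : d.get? p.1 with
  | none =>
    simp [PySem.Dict.contains_eq_isSome_get?, hg]
  | some l =>
    rw [PySem.Dict.contains_eq_isSome_get?, hg]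
    simp only [Option.isSome_some, if_pos]
    rw [PySem.Dict.getD_of_get?_eq_some _ _ hg, pvHeapDrop_of_sorted p.2 l (h _ _ hg)]
    cases l with
    | nil => rfl
    | cons x t =>
      by_cases hx : p.2 < x
      · simp only [if_pos hx]
        rw [if_neg (by omega)]
      · simp only [if_neg hx]
        rw [if_pos (by omega)]

lemma pvStep_inv (d : PySem.Dict String (List Int)) (res : List (Option Int)) (p : String × Int)
    (h : pvInv d) : pvInv (pvBStep (d, res) p).1 := by
  unfold pvBStep
  cases hg : d.get? p.1 with
  | none => exact h
  | some l =>
    have htail : ∀ (v : List Int), v.Pairwise (· ≤ ·) →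
        pvInv (d.insert p.1 v) := by
      intro v hv k l' hl'
      rw [PySem.Dict.get?_insert] at hl'
      split_ifs at hl' with hk
      · cases hl'; exact hv
      · exact h _ _ hl'
    cases l with
    | nil => exact htail [] List.Pairwise.nil
    | cons x t =>
      by_cases hx : x ≤ p.2
      · simp only [if_pos hx]
        exact htail t (List.pairwise_cons.1 (h _ _ hg)).2
      · simp only [if_neg hx]
        exact htail [] List.Pairwise.nil

lemma pvLoop_eq (reqs : List (String × Int)) (d : PySem.Dict String (List Int))
    (res : List (Option Int)) (h : pvInv d) :
    reqs.foldl pvAStep (d, res) = reqs.foldl pvBStep (d, res) := by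
  induction reqs generalizing d res with
  | nil => rfl
  | cons p t ih =>
    simp only [List.foldl_cons]
    rw [pvStep_eq d res p h]
    have h' := pvStep_inv d res p h
    rcases hst : pvBStep (d, res) p with ⟨d', res'⟩
    rw [hst] at h'
    exact ih d' res' h'

lemma pvFoldl_oi_pairwise (xs : List Int) :
    ∀ acc : List Int, acc.Pairwise (· ≤ ·) →
      (xs.foldl (fun acc x => List.orderedInsert (· ≤ ·) x acc) acc).Pairwise (· ≤ ·) := by
  induction xs with
  | nil => intro acc h; exact h
  | cons x t ih =>
    intro acc h
    exact ih _ (List.Pairwise.orderedInsert x acc h)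

lemma pvFoldl_oi_perm (xs : List Int) :
    ∀ acc : List Int,
      (xs.foldl (fun acc x => List.orderedInsert (· ≤ ·) x acc) acc).Perm (acc ++ xs) := by
  induction xs with
  | nil => intro acc; simp
  | cons x t ih =>
    intro acc
    simp only [List.foldl_cons]
    refine ((ih _).trans ?_)
    refine (List.Perm.append_right t (List.perm_orderedInsert _ x acc)).trans ?_
    exact List.perm_middle.symm

lemma pvFoldl_orderedInsert_eq_sorted (xs : List Int) :
    xs.foldl (fun acc x => List.orderedInsert (· ≤ ·) x acc) [] = PySem.List.sorted xs (fun x => x) false := by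
  refine (PySem.List.sorted_id_eq_of_perm_of_pairwise xs _ ?_ ?_).symm
  · simpa using pvFoldl_oi_perm xs []
  · exact pvFoldl_oi_pairwise xs [] List.Pairwise.nil

lemma pvAGetD (l : List (String × Int)) (d : PySem.Dict String (List Int)) (k : String) :
    ((l.foldl (fun d p => d.insert p.1 (List.orderedInsert (· ≤ ·) p.2 (d.getD p.1 []))) d).getD k []) =
      ((l.filter (fun p => p.1 == k)).map (fun p => p.2)).foldl
        (fun acc x => List.orderedInsert (· ≤ ·) x acc) (d.getD k []) := by
  induction l generalizing d with
  | nil => rfl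
  | cons p t ih =>
    simp only [List.foldl_cons, List.filter_cons]
    by_cases hk : p.1 = k
    · simp only [hk, beq_self_eq_true, if_pos, List.map_cons, List.foldl_cons]
      rw [ih, PySem.Dict.getD_insert_self]
    · have : (p.1 == k) = false := by simp [hk]
      simp only [this, Bool.false_eq_true, if_false]
      rw [ih, PySem.Dict.getD_insert]
      rw [if_neg (fun hh => hk hh.symm)]

lemma pvSortLoop (ks : List String) (d : PySem.Dict String (List Int))
    (hnd : ks.Nodup) (hmem : ∀ k ∈ ks, d.contains k = true) :
    (ks.foldl pvBSortAt d).keys = d.keys ∧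
      ∀ k, (ks.foldl pvBSortAt d).getD k [] =
        if k ∈ ks then PySem.List.sorted (d.getD k []) (fun x => x) false else d.getD k [] := by
  induction ks generalizing d with
  | nil => exact ⟨rfl, fun k => by simp⟩
  | cons k ks ih =>
    have hck := hmem k (by simp)
    have hkeys1 : (pvBSortAt d k).keys = d.keys :=
      PySem.Dict.keys_insert_of_contains d _ hck
    have hmem1 : ∀ k' ∈ ks, (pvBSortAt d k).contains k' = true := by
      intro k' hk'
      rw [PySem.Dict.contains_iff_mem_keys, hkeys1, ← PySem.Dict.contains_iff_mem_keys]
      exact hmem k' (by simp [hk'])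
    obtain ⟨ihk, ihg⟩ := ih (pvBSortAt d k) (List.nodup_cons.1 hnd).2 hmem1
    refine ⟨by rw [List.foldl_cons, ihk, hkeys1], ?_⟩
    intro k'
    rw [List.foldl_cons, ihg k']
    by_cases hks : k' ∈ ks
    · have hne : k' ≠ k := fun he => (List.nodup_cons.1 hnd).1 (he ▸ hks)
      simp only [if_pos hks, if_pos (List.mem_cons.2 (Or.inr hks))]
      unfold pvBSortAt
      rw [PySem.Dict.getD_insert, if_neg hne]
    · by_cases hkk : k' = k
      · subst hkk
        simp only [if_neg hks, if_pos (List.mem_cons.2 (Or.inl rfl))]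
        unfold pvBSortAt
        rw [PySem.Dict.getD_insert_self]
      · have : k' ∉ k :: ks := by simp [hkk, hks]
        simp only [if_neg hks, if_neg this]
        unfold pvBSortAt
        rw [PySem.Dict.getD_insert, if_neg hkk]

lemma pvBuild_eq (sellers : List (String × Int)) :
    sellers.foldl pvAInsert PySem.Dict.empty =
      (sellers.foldl pvBGroup PySem.Dict.empty).keys.foldl pvBSortAt (sellers.foldl pvBGroup PySem.Dict.empty) := by
  have hA : sellers.foldl pvAInsert PySem.Dict.empty =
      sellers.foldl (fun d p => d.insert p.1 (List.orderedInsert (· ≤ ·) p.2 (d.getD p.1 []))) PySem.Dict.empty := by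
    congr 1
    funext d p
    exact pvAInsert_eq d p
  set g0 := sellers.foldl pvBGroup PySem.Dict.empty with hg0
  have hg0' : g0 = sellers.foldl (fun d p => d.modify p.1 [] (fun l => l ++ [p.2])) PySem.Dict.empty := rfl
  -- keys of both builds
  have hkA : (sellers.foldl (fun d p => d.insert p.1 (List.orderedInsert (· ≤ ·) p.2 (d.getD p.1 []))) PySem.Dict.empty).keys
      = PySem.Set.update (PySem.Dict.empty : PySem.Dict String (List Int)).keys (sellers.map (fun p => p.1)) :=
    PySem.Dict.keys_foldl_insert_key sellers (fun p => p.1) _ _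
  have hkB : g0.keys = PySem.Set.update (PySem.Dict.empty : PySem.Dict String (List Int)).keys (sellers.map (fun p => p.1)) := by
    rw [hg0']
    exact PySem.Dict.keys_foldl_modify_key sellers (fun p => p.1) [] _ _
  have hndA : (sellers.foldl (fun d p => d.insert p.1 (List.orderedInsert (· ≤ ·) p.2 (d.getD p.1 []))) PySem.Dict.empty).keys.Nodup :=
    PySem.Dict.nodup_keys_foldl_insert_key sellers (fun p => p.1) _ _ (by simp [PySem.Dict.keys_empty])
  have hndB : g0.keys.Nodup := by
    rw [hg0']
    exact PySem.Dict.nodup_keys_foldl_modify_key sellers (fun p => p.1) [] _ _ (by simp [PySem.Dict.keys_empty])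
  obtain ⟨hkS, hgS⟩ := pvSortLoop g0.keys g0 hndB
    (fun k hk => (PySem.Dict.contains_iff_mem_keys g0 k).2 hk)
  rw [hA]
  apply PySem.Dict.ext
  rw [PySem.Dict.items_eq_map_keys _ hndA [],
      PySem.Dict.items_eq_map_keys _ (by rw [hkS]; exact hndB) []]
  rw [hkS, hkA, ← hkB]
  apply List.map_congr_left
  intro k hk
  refine congrArg _ ?_
  rw [pvAGetD, PySem.Dict.getD_empty, hgS k, if_pos hk, hg0',
      PySem.Dict.getD_foldl_modify_append, PySem.Dict.getD_empty, List.nil_append]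
  exact pvFoldl_orderedInsert_eq_sorted _

-- ===== VERDICT (by name: the statement is the Claim_ definition above) =====
theorem match_requests_spec : Claim_equal_match_requests := by
  intro requests sellers _
  unfold Spec_match_requests match_requests match_requests_alt
  simp only []
  have h0 : pvInv (PySem.Dict.empty : PySem.Dict String (List Int)) := by
    intro k l hl
    rw [PySem.Dict.get?_empty] at hl
    cases hl
  rw [pvLoop_eq requests _ [] (pvInv_build sellers _ h0), pvBuild_eq]
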